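-- pv_equiv track=rewrite | github.com/sofiateeriaho/Tetris-AI | simulation.py | count_wells
-- ===== SOURCE A (Python) =====
-- def count_wells(board):
--
--     rows = len(board)
--     cols = len(board[0])
--     wells = 0
--
--     for j in range(cols):
--         for i in range(rows):
--             if board[i][j] > 0:
--                 break
--             if board[i][j] == 0:
--                 # check first column
--                 if j == 0 and board[i][j+1] > 0:
--                     wells += 1
--                     break
--                 # check last column
--                 if j == cols-1 and board[i][j-1] > 0:
--                     wells += 1
--                     break
--                 if (j > 0 and board[i][j-1] > 0) and (j < cols-1 and board[i][j+1] > 0):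
--                     wells += 1
--                     break
--     return wells
-- ===== SOURCE B (Python) =====
-- def count_wells(board):
--     cols = len(board[0])
--     active = list(range(cols))   # columns whose scan is still open
--     wells = 0
--     for row in board:            # one row-major pass over the board
--         remaining = []
--         for j in active:
--             c = row[j]
--             if c > 0:
--                 continue         # filled cell closes the column, no well
--             if c == 0 and (j == 0 or row[j-1] > 0) and (j == cols - 1 or row[j+1] > 0):
--                 wells += 1       # flanked empty: well found, column closed
--                 continue
--             remaining.append(j)
--         active = remaining
--     return wells
-- ===== Notes on version B (the rewrite author's own statement) =====
-- stated objective: alternative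
-- what changed: A scans column-major with an inner break per column; B makes a single row-major pass over the board, carrying the list of still-open columns and counting a well the moment a flanked empty cell is seen, with the two edge checks folded into one short-circuit condition.
-- outside the precondition, e.g. on count_wells([[0, 1], [1]]): A returns 1, B returns 1; on count_wells([[-1], [0, 7]]): A returns 1, B returns 1; on count_wells([[-1], [0, -1], [1]]): A returns 0, B returns 1
import Mathlib
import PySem

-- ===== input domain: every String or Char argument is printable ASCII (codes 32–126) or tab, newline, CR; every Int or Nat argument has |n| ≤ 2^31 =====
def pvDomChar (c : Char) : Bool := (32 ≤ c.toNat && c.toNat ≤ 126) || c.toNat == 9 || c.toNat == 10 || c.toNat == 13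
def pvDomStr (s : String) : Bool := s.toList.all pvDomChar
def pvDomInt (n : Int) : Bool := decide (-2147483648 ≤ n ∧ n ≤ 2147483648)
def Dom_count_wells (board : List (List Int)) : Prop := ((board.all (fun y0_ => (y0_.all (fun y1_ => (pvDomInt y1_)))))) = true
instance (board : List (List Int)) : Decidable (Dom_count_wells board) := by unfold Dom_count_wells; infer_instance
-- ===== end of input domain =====

-- B replaces A's column-major nested scans (inner break per column) by a single row-major
-- pass that carries the list of still-open columns; same cost, different decomposition.

-- ===== PORT A =====
-- A's inner loop 'for i in range(rows)' with its 'break's, reading board[i][·]: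
-- ported as the obvious structural recursion over the list of rows (i ranges over all of board).
def aColScan (cols j : Int) (wells : Int) : List (List Int) → Int
  | [] => wells
  | r :: rest =>
    if PySem.List.pyGetD r j 0 > 0 then wells
    else if PySem.List.pyGetD r j 0 = 0 then
      if j = 0 ∧ PySem.List.pyGetD r (j+1) 0 > 0 then wells + 1
      else if j = cols - 1 ∧ PySem.List.pyGetD r (j-1) 0 > 0 then wells + 1
      else if (0 < j ∧ PySem.List.pyGetD r (j-1) 0 > 0) ∧ (j < cols - 1 ∧ PySem.List.pyGetD r (j+1) 0 > 0) then wells + 1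
      else aColScan cols j wells rest
    else aColScan cols j wells rest

def count_wells (board : List (List Int)) : Int :=
  let cols : Int := ((PySem.List.pyGetD board 0 []).length : Int)
  (PySem.List.pyRange 0 cols 1).foldl (fun wells j => aColScan cols j wells board) 0

-- ===== PORT B =====
-- B's flanked-empty test: c == 0 and (j == 0 or row[j-1] > 0) and (j == cols-1 or row[j+1] > 0)
def fireB (cols : Int) (row : List Int) (j : Int) : Bool :=
  decide (PySem.List.pyGetD row j 0 = 0 ∧
    (j = 0 ∨ PySem.List.pyGetD row (j-1) 0 > 0) ∧
    (j = cols - 1 ∨ PySem.List.pyGetD row (j+1) 0 > 0))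

-- body of B's inner 'for j in active' loop; state = (remaining, wells)
def bColStep (cols : Int) (row : List Int) (st : List Int × Int) (j : Int) : List Int × Int :=
  if PySem.List.pyGetD row j 0 > 0 then st
  else if fireB cols row j then (st.1, st.2 + 1)
  else (st.1 ++ [j], st.2)

-- body of B's outer 'for row in board' loop; state = (active, wells)
def bRowStep (cols : Int) (st : List Int × Int) (row : List Int) : List Int × Int :=
  st.1.foldl (bColStep cols row) ([], st.2)

def count_wells_alt (board : List (List Int)) : Int :=
  let cols : Int := ((PySem.List.pyGetD board 0 []).length : Int)
  (board.foldl (bRowStep cols) (PySem.List.pyRange 0 cols 1, 0)).2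

-- ===== PRECONDITION & SPEC =====
-- Pre_ excludes the empty board and the ragged / single-column boards on which A raises
-- IndexError once a column scan reaches an empty or missing cell; the few such boards that
-- escape the exception only by break order are excluded with them (e.g. [[1,1],[1]] and
-- [[-1],[0,7]]). Admitted: boards whose rows all reach the (≥ 2-wide) first row's width,
-- single-column boards with no empty cell before the column's first filled cell, and boards
-- whose first row is entirely filled.
def Pre_count_wells (board : List (List Int)) : Prop :=
  board ≠ [] ∧
  ((2 ≤ (board.headD []).length ∧ ∀ r ∈ board, (board.headD []).length ≤ r.length)
    ∨ ((board.headD []).length = 1 ∧ (∀ r ∈ board, 1 ≤ r.length) ∧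
        ((board.map (fun r => r.headD 0)).dropWhile (fun c => decide (c < 0))).head? ≠ some 0)
    ∨ (∀ c ∈ board.headD [], 0 < c))
instance (board : List (List Int)) : Decidable (Pre_count_wells board) := by
  unfold Pre_count_wells; infer_instance

def pvWitness_count_wells : List (List Int) := [[0, 1], [1, 0]]

def Spec_count_wells (board : List (List Int)) (out : Int) : Prop := out = count_wells_alt board
instance (board : List (List Int)) (out : Int) : Decidable (Spec_count_wells board out) := by
  unfold Spec_count_wells; infer_instance

-- ===== CLAIM (what is proved, stated in full; the proofs are below) =====
def Claim_equal_count_wells : Prop := ∀ (board : List (List Int)), Dom_count_wells board → Pre_count_wells board → Spec_count_wells board (count_wells board)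

-- ===== LEMMAS AND PROOFS =====

-- what one column contributes: 1 iff scanning the rows top-down, a flanked empty cell
-- is met before the first filled (> 0) cell in that column
def indCol (cols j : Int) : List (List Int) → Int
  | [] => 0
  | r :: rest =>
    if PySem.List.pyGetD r j 0 > 0 then 0
    else if fireB cols r j then 1 else indCol cols j rest

def keepB (cols : Int) (r : List Int) (j : Int) : Bool :=
  if PySem.List.pyGetD r j 0 > 0 then false
  else if fireB cols r j then false else true

def incB (cols : Int) (r : List Int) (j : Int) : Int :=
  if PySem.List.pyGetD r j 0 > 0 then 0
  else if fireB cols r j then 1 else 0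

theorem aColScan_eq (cols j : Int) (h0 : 0 ≤ j) (hc : j < cols) (h2 : 2 ≤ cols) :
    ∀ (rest : List (List Int)) (w : Int), aColScan cols j w rest = w + indCol cols j rest := by
  intro rest
  induction rest with
  | nil => intro w; simp [aColScan, indCol]
  | cons r rest ih =>
    intro w
    simp only [aColScan, indCol, fireB, decide_eq_true_eq]
    split_ifs <;> first | exact ih w | omega

theorem foldA_eq (cols : Int) (board : List (List Int)) :
    ∀ (l : List Int) (w : Int),
      (∀ j ∈ l, ∀ w', aColScan cols j w' board = w' + indCol cols j board) →
      l.foldl (fun wells j => aColScan cols j wells board) w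
        = w + (l.map (fun j => indCol cols j board)).sum := by
  intro l
  induction l with
  | nil => intro w _; simp
  | cons j l ih =>
    intro w hmem
    simp only [List.foldl_cons, List.map_cons, List.sum_cons]
    rw [hmem j (by simp), ih _ (fun x hx => hmem x (by simp [hx]))]
    ring

-- single-column case: while no empty cell has been met, A's scan of column 0 just walks
-- past negatives and stops at the first filled cell, counting nothing
theorem col_one_eq (rows : List (List Int)) :
    (∀ r ∈ rows, 1 ≤ r.length) →
    ((rows.map (fun r => r.headD 0)).dropWhile (fun c => decide (c < 0))).head? ≠ some 0 →
    ∀ w, aColScan 1 0 w rows = w ∧ indCol 1 0 rows = 0 := by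
  induction rows with
  | nil => intro _ _ w; simp [aColScan, indCol]
  | cons r rest ih =>
    intro hlen hP w
    obtain ⟨a, t, rfl⟩ : ∃ a t, r = a :: t := by
      cases r with
      | nil => exact absurd (hlen [] (by simp)) (by simp)
      | cons a t => exact ⟨a, t, rfl⟩
    have hget : PySem.List.pyGetD (a :: t) (0 : Int) 0 = a := by
      simp [PySem.List.pyGetD_zero_cons]
    rcases lt_trichotomy a 0 with ha | ha | ha
    · have hP' : ((rest.map (fun r => r.headD 0)).dropWhile (fun c => decide (c < 0))).head?
          ≠ some 0 := by
        simpa [ha] using hP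
      have hrec := ih (fun x hx => hlen x (by simp [hx])) hP' w
      have hfire : fireB 1 (a :: t) 0 = false := by
        simp [fireB, hget]
        omega
      constructor
      · simpa [aColScan, hget, hfire, show ¬ (0:Int) < a by omega, show ¬ a = 0 by omega]
          using hrec.1
      · simpa [indCol, hget, hfire, show ¬ (0:Int) < a by omega, show ¬ a = 0 by omega]
          using hrec.2
    · exfalso
      apply hP
      simp [ha]
    · constructor
      · simp [aColScan, hget, ha]
      · simp [indCol, hget, ha]

theorem bInner_eq (cols : Int) (row : List Int) :
    ∀ (active acc : List Int) (w : Int),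
      active.foldl (bColStep cols row) (acc, w)
        = (acc ++ active.filter (keepB cols row), w + (active.map (incB cols row)).sum) := by
  intro active
  induction active with
  | nil => intro acc w; simp
  | cons j active ih =>
    intro acc w
    by_cases hp : PySem.List.pyGetD row j 0 > 0
    · simp only [List.foldl_cons, bColStep, hp, if_true]
      rw [ih]
      simp [keepB, incB, hp]
    · by_cases hf : fireB cols row j
      · simp only [List.foldl_cons, bColStep, hp, if_false, hf, if_true]
        rw [ih]
        simp [keepB, incB, hp, hf]
        ring
      · simp only [List.foldl_cons, bColStep, hp, if_false, hf]
        rw [ih]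
        simp [keepB, incB, hp, hf]

theorem indCol_cons (cols j : Int) (r : List Int) (rest : List (List Int)) :
    indCol cols j (r :: rest)
      = incB cols r j + (if keepB cols r j then indCol cols j rest else 0) := by
  simp only [indCol, incB, keepB]
  split_ifs <;> simp_all

theorem split_eq (cols : Int) (r : List Int) (rest : List (List Int)) :
    ∀ (active : List Int),
      (active.map (fun j => indCol cols j (r :: rest))).sum
        = (active.map (incB cols r)).sum
          + ((active.filter (keepB cols r)).map (fun j => indCol cols j rest)).sum := by
  intro active
  induction active with
  | nil => simp
  | cons j active ih =>
    simp only [List.map_cons, List.sum_cons, List.filter_cons]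
    rw [ih, indCol_cons]
    by_cases hk : keepB cols r j = true
    · simp [hk]
      ring
    · simp [hk]
      ring

theorem bOuter_eq (cols : Int) :
    ∀ (rows : List (List Int)) (active : List Int) (w : Int),
      (rows.foldl (bRowStep cols) (active, w)).2
        = w + (active.map (fun j => indCol cols j rows)).sum := by
  intro rows
  induction rows with
  | nil =>
    intro active w
    simp [indCol]
  | cons r rest ih =>
    intro active w
    simp only [List.foldl_cons]
    have hstep : bRowStep cols (active, w) r
        = (active.filter (keepB cols r), w + (active.map (incB cols r)).sum) := by
      simp [bRowStep, bInner_eq]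
    rw [hstep, ih, split_eq]
    ring

-- ===== VERDICT (by name: the statement is the Claim_ definition above) =====
theorem count_wells_spec : Claim_equal_count_wells := by
  intro board _ hpre
  obtain ⟨hne, hcases⟩ := hpre
  obtain ⟨r0, rest, rfl⟩ : ∃ r0 rest, board = r0 :: rest := by
    cases board with
    | nil => exact absurd rfl hne
    | cons r0 rest => exact ⟨r0, rest, rfl⟩
  show count_wells (r0 :: rest) = count_wells_alt (r0 :: rest)
  have hget : PySem.List.pyGetD (r0 :: rest) 0 ([] : List Int) = r0 := by
    simp [PySem.List.pyGetD_zero_cons]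
  have hpoint : ∀ j ∈ PySem.List.pyRange 0 (r0.length : Int) 1,
      ∀ w', aColScan (r0.length : Int) j w' (r0 :: rest) = w' + indCol (r0.length : Int) j (r0 :: rest) := by
    intro j hj w'
    rw [PySem.List.mem_pyRange_one] at hj
    rcases hcases with ⟨h2, _⟩ | ⟨h1, hlen, hP⟩ | hpos
    · exact aColScan_eq _ j hj.1 hj.2 (by exact_mod_cast h2) (r0 :: rest) w'
    · have hj0 : j = 0 := by
        simp only [List.headD_cons] at h1
        omega
      have hc1 : (r0.length : Int) = 1 := by
        simp only [List.headD_cons] at h1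
        exact_mod_cast h1
      subst hj0
      rw [hc1]
      have := col_one_eq (r0 :: rest) (by simpa using hlen) (by simpa using hP) w'
      rw [this.1, this.2]
      ring
    · have hcell : 0 < PySem.List.pyGetD r0 j 0 := by
        rw [PySem.List.pyGetD_eq_getElem r0 0 hj.1 hj.2]
        exact hpos _ (by simp [List.getElem_mem])
      simp [aColScan, indCol, hcell]
  rw [show count_wells (r0 :: rest)
      = (PySem.List.pyRange 0 ((r0.length : Nat) : Int) 1).foldl
          (fun wells j => aColScan (r0.length : Int) j wells (r0 :: rest)) 0 from by
        unfold count_wells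
        rw [hget]]
  rw [foldA_eq _ _ _ 0 hpoint]
  unfold count_wells_alt
  rw [hget, bOuter_eq]
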